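-- pv_equiv track=rewrite | github.com/nipssubmisson/CRDA | CRDA/training/dataset/sbiplus_dataset_ppo.py | format_imglist
-- ===== SOURCE A (Python) =====
-- def format_imglist(img_list):
--     new_list={}
--     for img,label in img_list:
--         video_name = img.split('\\')[-2]
--         if len(video_name)>4:
--             video_name=video_name[:3]
--         if video_name in new_list:
--             new_list[video_name].append(tuple((img,label)))
--         else:
--             new_list[video_name]=[]
--             new_list[video_name].append(tuple((img,label)))
--     for key in new_list.keys():
--         new_list[key].sort()
--     return new_list
-- ===== SOURCE B (Python) =====
-- def format_imglist(img_list):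
--     def video_of(img):
--         v = img.split('\\')[-2]
--         return v[:3] if len(v) > 4 else v
--
--     keys = []
--     seen = set()
--     for img, _label in img_list:
--         v = video_of(img)
--         if v not in seen:
--             seen.add(v)
--             keys.append(v)
--     ordered = sorted(img_list)
--     return {k: [p for p in ordered if video_of(p[0]) == k] for k in keys}
-- ===== Notes on version B (the rewrite author's own statement) =====
-- stated objective: alternative
-- what changed: Instead of building a dict of buckets incrementally and sorting each bucket afterwards, B sorts the whole list once and builds each group (keys in first-occurrence order) by filtering the globally sorted list, so no per-bucket sort is needed.
-- outside the precondition, e.g. on format_imglist([('noslash.jpg', 1)]): A raises IndexError, B raises IndexError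
import Mathlib
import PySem

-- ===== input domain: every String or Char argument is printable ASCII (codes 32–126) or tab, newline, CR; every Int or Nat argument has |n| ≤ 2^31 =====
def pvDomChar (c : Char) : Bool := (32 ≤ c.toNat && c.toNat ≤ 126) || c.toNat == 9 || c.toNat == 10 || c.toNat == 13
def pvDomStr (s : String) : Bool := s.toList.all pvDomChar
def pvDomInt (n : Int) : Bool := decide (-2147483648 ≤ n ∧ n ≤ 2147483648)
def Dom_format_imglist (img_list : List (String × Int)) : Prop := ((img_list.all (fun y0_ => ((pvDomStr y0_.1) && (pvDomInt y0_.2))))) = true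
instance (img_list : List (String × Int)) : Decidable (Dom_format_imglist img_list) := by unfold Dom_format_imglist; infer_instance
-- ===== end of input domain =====

-- B groups by sorting the whole list once and filtering each first-occurrence key, instead of A's
-- dict-of-buckets built incrementally with a per-bucket sort (objective: alternative decomposition).
-- A mutates nothing observable; equivalence is about the returned dict (as an insertion-ordered list).

-- shared helper: the video-name derivation both Pythons perform on each path
-- (split on '\', take [-2] — pyGetD is exact under Pre_, which guarantees '\' occurs — truncate to 3 chars if len > 4)
def pvVideoName (img : String) : String :=
  let parts := (PySem.Str.split? img "\\").getD []
  let v := PySem.List.pyGetD parts (-2) ""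
  if PySem.Str.len v > 4 then PySem.Str.slice v none (some 3) else v

-- ===== PORT A =====
def format_imglist (img_list : List (String × Int)) : List (String × List (String × Int)) :=
  let new_list : PySem.Dict String (List (String × Int)) :=
    img_list.foldl (fun d p =>
      let video_name := pvVideoName p.1
      if d.contains video_name then
        d.modify video_name [] (fun l => l ++ [p])
      else
        (d.insert video_name []).modify video_name [] (fun l => l ++ [p]))
      PySem.Dict.empty
  -- second loop: each value sorted in place (Python tuple order = lexicographic, encoded via toLex)
  new_list.items.map (fun kv => (kv.1, PySem.List.sorted kv.2 (fun q => toLex q) false))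

-- ===== PORT B =====
def format_imglist_alt (img_list : List (String × Int)) : List (String × List (String × Int)) :=
  let keys := PySem.List.dedup (img_list.map (fun p => pvVideoName p.1))
  let ordered := PySem.List.sorted img_list (fun q => toLex q) false
  keys.map (fun k => (k, ordered.filter (fun p => pvVideoName p.1 == k)))

-- ===== PRECONDITION & SPEC =====
-- Pre_ excludes inputs where some img contains no backslash: there img.split('\\')[-2] raises IndexError in A (and in B).
def Pre_format_imglist (img_list : List (String × Int)) : Prop :=
  ∀ p ∈ img_list, PySem.Str.isIn "\\" p.1 = true
instance (img_list : List (String × Int)) : Decidable (Pre_format_imglist img_list) := by unfold Pre_format_imglist; infer_instance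
def pvWitness_format_imglist : (List (String × Int)) := [("a\\vid1\\f1.jpg", 1), ("a\\vid1\\f0.jpg", 0), ("a\\other\\f.jpg", 7)]

def Spec_format_imglist (img_list : List (String × Int)) (out : List (String × List (String × Int))) : Prop := out = format_imglist_alt img_list
instance (img_list : List (String × Int)) (out : List (String × List (String × Int))) : Decidable (Spec_format_imglist img_list out) := by unfold Spec_format_imglist; infer_instance

-- ===== CLAIM (what is proved, stated in full; the proofs are below) =====
def Claim_equal_format_imglist : Prop := ∀ (img_list : List (String × Int)), Dom_format_imglist img_list → Pre_format_imglist img_list → Spec_format_imglist img_list (format_imglist img_list)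

-- ===== LEMMAS AND PROOFS =====

-- A's loop body is, on both branches, d[v] = d.get(v, []) + [p]
theorem pv_body_eq (d : PySem.Dict String (List (String × Int))) (p : String × Int) :
    (let video_name := pvVideoName p.1
     if d.contains video_name then
       d.modify video_name [] (fun l => l ++ [p])
     else
       (d.insert video_name []).modify video_name [] (fun l => l ++ [p]))
    = d.modify (pvVideoName p.1) [] (fun l => l ++ [p]) := by
  by_cases h : d.contains (pvVideoName p.1)
  · simp [h]
  · simp only [h, if_neg, Bool.false_eq_true, not_false_eq_true]
    simp only [PySem.Dict.modify, PySem.Dict.getD_insert_self, PySem.Dict.insert_insert_self]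
    rw [PySem.Dict.getD_of_not_contains d [] (by simpa using h)]

-- the dict after A's first loop: buckets are the in-order filters, keys the first-occurrence dedup
theorem pv_fold_eq (img_list : List (String × Int)) :
    img_list.foldl (fun d p =>
      let video_name := pvVideoName p.1
      if d.contains video_name then
        d.modify video_name [] (fun l => l ++ [p])
      else
        (d.insert video_name []).modify video_name [] (fun l => l ++ [p]))
      PySem.Dict.empty
    = img_list.foldl (fun d p => d.modify (pvVideoName p.1) [] (fun l => l ++ [p])) PySem.Dict.empty := by
  exact PySem.List.foldl_congr_mem _ _ _ _ (fun acc x _ => pv_body_eq acc x)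

theorem pv_getD_fold (img_list : List (String × Int)) (c : String) :
    (img_list.foldl (fun d p => d.modify (pvVideoName p.1) [] (fun l => l ++ [p])) PySem.Dict.empty).getD c []
    = img_list.filter (fun p => pvVideoName p.1 == c) := by
  have h := PySem.Dict.getD_foldl_modify_append
    (img_list.map (fun p => (pvVideoName p.1, p))) (PySem.Dict.empty) c
  rw [List.foldl_map] at h
  simpa [List.filter_map, List.map_map, Function.comp_def] using h

theorem pv_keys_fold (img_list : List (String × Int)) :
    (img_list.foldl (fun d p => d.modify (pvVideoName p.1) [] (fun l => l ++ [p])) PySem.Dict.empty).keys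
    = PySem.List.dedup (img_list.map (fun p => pvVideoName p.1)) := by
  rw [PySem.Dict.keys_foldl_modify_key img_list (fun p => pvVideoName p.1) [] (fun _ p => fun l => l ++ [p])]
  simp [PySem.Set.update_nil_left]

-- sorting a filtered list = filtering the sorted list (Python tuple order; toLex is injective)
theorem pv_sorted_filter (l : List (String × Int)) (q : String × Int → Bool) :
    PySem.List.sorted (l.filter q) (fun p => toLex p) false
    = (PySem.List.sorted l (fun p => toLex p) false).filter q := by
  apply PySem.List.eq_of_perm_of_pairwise_le_of_injective (fun p => toLex p) toLex.injective
  · exact ((PySem.List.sorted_perm _ _ _).trans ((PySem.List.sorted_perm l _ _).filter q).symm)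
  · exact PySem.List.sorted_pairwise _ _
  · exact (PySem.List.sorted_pairwise l _).filter q

-- ===== VERDICT (by name: the statement is the Claim_ definition above) =====
theorem format_imglist_spec : Claim_equal_format_imglist := by
  intro img_list _ _
  unfold Spec_format_imglist format_imglist format_imglist_alt
  rw [pv_fold_eq]
  dsimp only
  set d := img_list.foldl (fun d p => d.modify (pvVideoName p.1) [] (fun l => l ++ [p])) PySem.Dict.empty with hd
  have hnd : d.keys.Nodup := by
    exact PySem.Dict.nodup_keys_foldl_modify_key img_list (fun p => pvVideoName p.1) []
      (fun _ p => fun l => l ++ [p]) PySem.Dict.empty (by simp [PySem.Dict.empty, PySem.Dict.keys])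
  rw [PySem.Dict.items_eq_map_keys d hnd [], pv_keys_fold img_list, List.map_map]
  apply List.map_congr_left
  intro k _
  simp only [Function.comp]
  rw [pv_getD_fold img_list k, pv_sorted_filter]
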